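-- pv_equiv track=rewrite | github.com/Shimizu-Technology/HafaGPT-API | evaluation/test_stress.py | _generate_long_text
-- ===== SOURCE A (Python) =====
-- def _generate_long_text(target_tokens: int) -> str:
--     """
--     Generate text of approximately the target token count.
--     ~4 chars per token on average.
--     """
--     # Use realistic Chamorro learning content
--     base_phrases = [
--         "I want to learn how to say many different things in the Chamorro language. ",
--         "Please teach me about Chamorro grammar, vocabulary, and cultural expressions. ",
--         "What are the most common greetings, farewells, and everyday phrases? ",
--         "Can you explain the difference between formal and informal speech in Chamorro? ",
--         "I'm interested in learning about Chamorro food, family, nature, and traditions. ",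
--         "How do you conjugate verbs in Chamorro? What are the different tenses? ",
--         "Tell me about the history and origins of the Chamorro language. ",
--         "What resources are available for learning Chamorro? Are there any good books? ",
--         "I want to practice having conversations in Chamorro with my family. ",
--         "Please help me understand the pronunciation rules for Chamorro words. ",
--     ]
--
--     # Repeat to reach target length
--     text = ""
--     target_chars = target_tokens * 4  # ~4 chars per token
--
--     while len(text) < target_chars:
--         for phrase in base_phrases:
--             text += phrase
--             if len(text) >= target_chars:
--                 break
--
--     return text[:target_chars]
-- ===== SOURCE B (Python) =====
-- def _generate_long_text(target_tokens: int) -> str: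
--     """
--     Generate text of approximately the target token count.
--     ~4 chars per token on average.
--     """
--     base_phrases = [
--         "I want to learn how to say many different things in the Chamorro language. ",
--         "Please teach me about Chamorro grammar, vocabulary, and cultural expressions. ",
--         "What are the most common greetings, farewells, and everyday phrases? ",
--         "Can you explain the difference between formal and informal speech in Chamorro? ",
--         "I'm interested in learning about Chamorro food, family, nature, and traditions. ",
--         "How do you conjugate verbs in Chamorro? What are the different tenses? ",
--         "Tell me about the history and origins of the Chamorro language. ",
--         "What resources are available for learning Chamorro? Are there any good books? ",
--         "I want to practice having conversations in Chamorro with my family. ",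
--         "Please help me understand the pronunciation rules for Chamorro words. ",
--     ]
--     block = "".join(base_phrases)
--     target_chars = target_tokens * 4
--     if target_chars <= 0:
--         return ""
--     reps = -(-target_chars // len(block))  # ceiling division
--     return (block * reps)[:target_chars]
-- ===== Notes on version B (the rewrite author's own statement) =====
-- stated objective: simpler
-- what changed: Replaced A's while/for grow-and-break append loop with a closed-form computation: join the phrases into one block once, ceiling-divide the target character count by its length, repeat the block that many times and slice to the target length.
import Mathlib
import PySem

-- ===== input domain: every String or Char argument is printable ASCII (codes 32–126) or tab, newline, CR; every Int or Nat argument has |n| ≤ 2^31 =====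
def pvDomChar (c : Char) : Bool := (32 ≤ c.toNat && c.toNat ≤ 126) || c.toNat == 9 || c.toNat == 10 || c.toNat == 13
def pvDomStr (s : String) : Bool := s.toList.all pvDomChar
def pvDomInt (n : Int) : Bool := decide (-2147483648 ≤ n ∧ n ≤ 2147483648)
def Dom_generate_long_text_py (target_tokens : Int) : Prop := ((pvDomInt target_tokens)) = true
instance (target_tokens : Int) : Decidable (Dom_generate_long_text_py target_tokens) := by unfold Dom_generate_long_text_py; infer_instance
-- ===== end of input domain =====

-- B replaces A's grow-until-long-enough append loop by a closed-form ceiling-division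
-- repeat-and-slice of the joined phrase block (objective: simpler).


-- ===== PORT A =====
-- Python str is modelled as List Char throughout; the final result is wrapped back to String.
-- the identical base_phrases literal both Pythons carry
def pvPhrases : List (List Char) :=
  [ "I want to learn how to say many different things in the Chamorro language. ".toList,
    "Please teach me about Chamorro grammar, vocabulary, and cultural expressions. ".toList,
    "What are the most common greetings, farewells, and everyday phrases? ".toList,
    "Can you explain the difference between formal and informal speech in Chamorro? ".toList,
    "I'm interested in learning about Chamorro food, family, nature, and traditions. ".toList,
    "How do you conjugate verbs in Chamorro? What are the different tenses? ".toList,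
    "Tell me about the history and origins of the Chamorro language. ".toList,
    "What resources are available for learning Chamorro? Are there any good books? ".toList,
    "I want to practice having conversations in Chamorro with my family. ".toList,
    "Please help me understand the pronunciation rules for Chamorro words. ".toList ]

-- A's inner 'for phrase in base_phrases: text += phrase; if len(text) >= target_chars: break'
def pvInner (tc : Int) : List (List Char) → List Char → List Char
  | [], text => text
  | p :: ps, text =>
      let text' := text ++ p
      if tc ≤ (text'.length : Int) then text' else pvInner tc ps text'

-- needed only for pvOuter's termination (cited in decreasing_by)
theorem pvInner_len_ge (tc : Int) (ps : List (List Char)) (text : List Char) :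
    text.length ≤ (pvInner tc ps text).length := by
  induction ps generalizing text with
  | nil => simp [pvInner]
  | cons p ps ih =>
      simp only [pvInner]
      split
      · simp
      · exact le_trans (by simp) (ih (text ++ p))

-- needed only for pvOuter's termination (cited in decreasing_by)
theorem pvInner_len_gt' (tc : Int) (p : List Char) (ps : List (List Char)) (text : List Char)
    (hp : 0 < p.length) : text.length < (pvInner tc (p :: ps) text).length := by
  simp only [pvInner]
  split
  · simp only [List.length_append]; omega
  · have h2 := pvInner_len_ge tc ps (text ++ p)
    simp only [List.length_append] at h2
    omega

set_option maxRecDepth 10000 in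
-- needed only for pvOuter's termination (cited in decreasing_by)
theorem pvInner_len_gt (tc : Int) (text : List Char) :
    text.length < (pvInner tc pvPhrases text).length := by
  unfold pvPhrases
  exact pvInner_len_gt' tc _ _ text (by decide)

-- A's outer 'while len(text) < target_chars:' loop
def pvOuter (tc : Int) (text : List Char) : List Char :=
  if (text.length : Int) < tc then
    pvOuter tc (pvInner tc pvPhrases text)
  else text
termination_by (tc - text.length).toNat
decreasing_by
  have h1 := pvInner_len_gt tc text
  omega

def generate_long_text_py (target_tokens : Int) : String :=
  let target_chars := target_tokens * 4
  String.ofList (PySem.List.slice (pvOuter target_chars []) none (some target_chars))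

-- ===== PORT B =====
def generate_long_text_py_alt (target_tokens : Int) : String :=
  let block := PySem.Chars.join [] pvPhrases
  let target_chars := target_tokens * 4
  if target_chars ≤ 0 then ""
  else
    let reps := -(PySem.Int.floordiv (-target_chars) (block.length : Int))  -- ceiling division
    String.ofList (PySem.List.slice ((List.replicate reps.toNat block).flatten) none (some target_chars))

-- ===== PRECONDITION & SPEC =====
def Spec_generate_long_text_py (target_tokens : Int) (out : String) : Prop := out = generate_long_text_py_alt target_tokens
instance (target_tokens : Int) (out : String) : Decidable (Spec_generate_long_text_py target_tokens out) := by unfold Spec_generate_long_text_py; infer_instance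

-- ===== CLAIM (what is proved, stated in full; the proofs are below) =====
def Claim_equal_generate_long_text_py : Prop := ∀ (target_tokens : Int), Dom_generate_long_text_py target_tokens → Spec_generate_long_text_py target_tokens (generate_long_text_py target_tokens)

-- ===== LEMMAS AND PROOFS =====

-- the block of n whole copies of the phrase cycle
def pvPow (n : Nat) : List Char := (List.replicate n pvPhrases.flatten).flatten

theorem pvPow_succ (n : Nat) : pvPow (n + 1) = pvPow n ++ pvPhrases.flatten := by
  simp [pvPow, List.replicate_succ']

theorem pvPow_prefix {m n : Nat} (h : m ≤ n) : pvPow m <+: pvPow n := by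
  induction n with
  | zero => simp_all
  | succ k ih =>
      rcases Nat.lt_or_ge m (k + 1) with hm | hm
      · exact (ih (by omega)).trans (by rw [pvPow_succ]; exact List.prefix_append _ _)
      · have : m = k + 1 := by omega
        subst this; rfl

theorem pvPow_length (n : Nat) : (pvPow n).length = n * pvPhrases.flatten.length := by
  simp [pvPow]

theorem take_of_prefix {s t : List Char} (n : Nat) (h : s <+: t) (hn : n ≤ s.length) :
    s.take n = t.take n := by
  obtain ⟨r, rfl⟩ := h
  rw [List.take_append_of_le_length hn]

theorem pvInner_spec (tc : Int) (ps : List (List Char)) (text : List Char) :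
    pvInner tc ps text <+: text ++ ps.flatten ∧
      (tc ≤ ((pvInner tc ps text).length : Int) ∨ pvInner tc ps text = text ++ ps.flatten) := by
  induction ps generalizing text with
  | nil => simp [pvInner]
  | cons p ps ih =>
      simp only [pvInner]
      split
      · refine ⟨?_, Or.inl (by assumption)⟩
        simp only [List.flatten_cons, ← List.append_assoc]
        exact List.prefix_append _ _
      · obtain ⟨h1, h2⟩ := ih (text ++ p)
        refine ⟨?_, ?_⟩
        · simpa [List.append_assoc] using h1
        · rcases h2 with h2 | h2
          · exact Or.inl h2
          · exact Or.inr (by simpa [List.append_assoc] using h2)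

theorem pvOuter_spec (tc : Int) (text : List Char) :
    ∀ n : Nat, text <+: pvPow n → (tc ≤ (text.length : Int) ∨ text = pvPow n) →
      ∃ M, pvOuter tc text <+: pvPow M ∧ tc ≤ ((pvOuter tc text).length : Int) := by
  induction text using pvOuter.induct tc with
  | case1 text hc ih =>
      intro n hpre h
      rcases h with h | h
      · omega
      · subst h
        obtain ⟨h1, h2⟩ := pvInner_spec tc pvPhrases (pvPow n)
        rw [← pvPow_succ] at h1 h2
        rw [pvOuter, if_pos hc]
        exact ih (n + 1) h1 h2
  | case2 text hc =>
      intro n hpre h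
      rw [pvOuter, if_neg hc]
      exact ⟨n, hpre, by omega⟩

theorem flatten_intersperse_nil (xs : List (List Char)) :
    (List.intersperse ([] : List Char) xs).flatten = xs.flatten := by
  induction xs with
  | nil => rfl
  | cons a t ih => cases t <;> simp_all [List.intersperse]

theorem pvBlock_eq : PySem.Chars.join [] pvPhrases = pvPhrases.flatten := by
  simp only [PySem.Chars.join, List.intercalate]
  exact flatten_intersperse_nil pvPhrases

set_option maxRecDepth 10000 in
theorem pvBlock_len_pos : 0 < pvPhrases.flatten.length := by decide

-- ===== VERDICT (by name: the statement is the Claim_ definition above) =====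
theorem generate_long_text_py_spec : Claim_equal_generate_long_text_py := by
  intro tt _
  unfold Spec_generate_long_text_py generate_long_text_py generate_long_text_py_alt
  simp only [pvBlock_eq]
  set tc := tt * 4 with htc
  by_cases hpos : tc ≤ 0
  · rw [if_pos hpos]
    have houter : pvOuter tc [] = [] := by
      rw [pvOuter, if_neg (by simp; omega)]
    rw [houter]
    have : PySem.List.slice ([] : List Char) none (some tc) = [] := by
      simp [PySem.List.slice]
    rw [this]
  · rw [if_neg hpos]
    have hpos' : 0 < tc := by omega
    -- A side
    obtain ⟨M, hMpre, hMlen⟩ := pvOuter_spec tc [] 0 (by simp [pvPow]) (Or.inr (by simp [pvPow]))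
    -- B side
    set L := (pvPhrases.flatten.length : Int) with hL
    have hLpos : 0 < L := by rw [hL]; exact_mod_cast pvBlock_len_pos
    set reps := -(PySem.Int.floordiv (-tc) L) with hreps
    have hb : (reps - 1) * L < tc ∧ tc ≤ reps * L :=
      (PySem.Int.neg_floordiv_neg_eq_iff_of_pos (a := tc) (b := L) (q := reps) hLpos).mp rfl
    have hrep_nonneg : 0 < reps := by nlinarith [hb.1, hb.2]
    have hBlen : tc ≤ (((List.replicate reps.toNat pvPhrases.flatten).flatten).length : Int) := by
      have : ((List.replicate reps.toNat pvPhrases.flatten).flatten) = pvPow reps.toNat := rfl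
      rw [this, pvPow_length]
      push_cast
      calc tc ≤ reps * L := hb.2
        _ = (reps.toNat : Int) * L := by rw [Int.toNat_of_nonneg (le_of_lt hrep_nonneg)]
    -- both sides are takes of pvPow (max M reps.toNat)
    have htcnn : (0:Int) ≤ tc := by omega
    rw [PySem.List.slice_to (pvOuter tc []) htcnn, PySem.List.slice_to _ htcnn]
    congr 1
    have hA : (pvOuter tc []).take tc.toNat = (pvPow (max M reps.toNat)).take tc.toNat := by
      apply take_of_prefix
      · exact hMpre.trans (pvPow_prefix (le_max_left _ _))
      · omega
    have hB : ((List.replicate reps.toNat pvPhrases.flatten).flatten).take tc.toNat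
        = (pvPow (max M reps.toNat)).take tc.toNat := by
      apply take_of_prefix
      · exact pvPow_prefix (le_max_right _ _)
      · have := hBlen; omega
    rw [hA, hB]
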